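-- pv_equiv track=rewrite | github.com/ETCBC/Biblical_Hebrew_Analysis | Notebooks/Psalms.py | set_word_to_unicode
-- ===== SOURCE A (Python) =====
-- def test_final_character(c):
--     if c == 'P':
--         return 'p'
--     elif c == 'M':
--         return 'm'
--     elif c == 'N':
--         return 'n'
--     elif c == 'K':
--         return 'k'
--     elif c == 'Y':
--         return 'y'
--     else:
--         return c
--
-- def set_word_to_unicode(sp, conversion):
--     i = 1
--     result = ""
--     for c in sp:
--         if i == len(sp):
--             c = test_final_character(c)
--         result += (conversion[c])
--         i += 1
--     return result
-- ===== SOURCE B (Python) =====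
-- def test_final_character(c):
--     if c == 'P':
--         return 'p'
--     elif c == 'M':
--         return 'm'
--     elif c == 'N':
--         return 'n'
--     elif c == 'K':
--         return 'k'
--     elif c == 'Y':
--         return 'y'
--     else:
--         return c
--
-- def set_word_to_unicode(sp, conversion):
--     # structural recursion: the singleton base case IS the final-character case,
--     # so no index counter and no in-loop "last?" test are needed
--     def go(cs):
--         if not cs:
--             return ""
--         if len(cs) == 1:
--             return conversion[test_final_character(cs[0])]
--         return conversion[cs[0]] + go(cs[1:])
--     return go(sp)
-- ===== Notes on version B (the rewrite author's own statement) =====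
-- stated objective: alternative
-- what changed: Replaces A's counted loop with its per-iteration 'i == len(sp)' test by structural recursion on the string in which the singleton base case performs the final-character conversion, so no index counter or last-position branch exists.
import Mathlib
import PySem

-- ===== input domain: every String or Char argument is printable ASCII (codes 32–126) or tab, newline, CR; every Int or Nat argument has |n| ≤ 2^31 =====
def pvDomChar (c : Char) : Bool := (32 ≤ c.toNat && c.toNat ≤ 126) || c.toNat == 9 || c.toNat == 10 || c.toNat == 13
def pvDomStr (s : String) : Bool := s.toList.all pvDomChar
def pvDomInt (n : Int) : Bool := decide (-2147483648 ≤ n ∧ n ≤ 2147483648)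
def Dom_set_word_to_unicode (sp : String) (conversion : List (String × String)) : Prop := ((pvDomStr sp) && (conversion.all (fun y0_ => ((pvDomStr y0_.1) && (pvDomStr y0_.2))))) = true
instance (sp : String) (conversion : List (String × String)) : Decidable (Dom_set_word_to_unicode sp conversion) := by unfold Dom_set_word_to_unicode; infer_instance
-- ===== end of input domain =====

-- B replaces A's counted loop (with its per-iteration "am I at the last character?" test) by
-- structural recursion whose singleton base case performs the final-character conversion.

-- ===== PORT A =====
-- helper test_final_character (one character at a time)
def test_final_character (c : Char) : Char :=
  if c == 'P' then 'p'
  else if c == 'M' then 'm'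
  else if c == 'N' then 'n'
  else if c == 'K' then 'k'
  else if c == 'Y' then 'y'
  else c

-- conversion[c] (c a one-character string): KeyError on a missing key, so the total form getD is
-- used and Pre_ excludes exactly the missing-key inputs
def pvLookup (conversion : List (String × String)) (c : Char) : List Char :=
  ((PySem.Dict.mk conversion).getD (String.singleton c) "").toList

def set_word_to_unicode (sp : String) (conversion : List (String × String)) : String :=
  let n := PySem.Str.len sp
  let st := sp.toList.foldl (fun (st : Int × List Char) c =>
    let c := if st.1 == n then test_final_character c else c
    (st.1 + 1, st.2 ++ pvLookup conversion c)) (1, [])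
  String.mk st.2

-- ===== PORT B =====
-- the inner recursive helper go of Source B, on the character list
def set_word_to_unicode_go (conversion : List (String × String)) : List Char → List Char
  | [] => []
  | [c] => pvLookup conversion (test_final_character c)
  | c :: d :: rest => pvLookup conversion c ++ set_word_to_unicode_go conversion (d :: rest)

def set_word_to_unicode_alt (sp : String) (conversion : List (String × String)) : String :=
  String.mk (set_word_to_unicode_go conversion sp.toList)

-- ===== PRECONDITION & SPEC =====
-- Pre_ excludes exactly the inputs on which Python A raises KeyError: some looked-up character
-- (the last one after final-character adjustment) is not a key of conversion.
def Pre_set_word_to_unicode (sp : String) (conversion : List (String × String)) : Prop :=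
  (sp.toList.dropLast.all (fun c => ((PySem.Dict.mk conversion).get? (String.singleton c)).isSome)) = true ∧
  (sp.toList ≠ [] →
    ((PySem.Dict.mk conversion).get? (String.singleton (test_final_character (sp.toList.getLastD ' ')))).isSome = true)
instance (sp : String) (conversion : List (String × String)) : Decidable (Pre_set_word_to_unicode sp conversion) := by
  unfold Pre_set_word_to_unicode; infer_instance

def pvWitness_set_word_to_unicode : String × (List (String × String)) :=
  ("BAP", [("B", "b"), ("A", "a"), ("p", "f")])

def Spec_set_word_to_unicode (sp : String) (conversion : List (String × String)) (out : String) : Prop := out = set_word_to_unicode_alt sp conversion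
instance (sp : String) (conversion : List (String × String)) (out : String) : Decidable (Spec_set_word_to_unicode sp conversion out) := by unfold Spec_set_word_to_unicode; infer_instance

-- ===== CLAIM (what is proved, stated in full; the proofs are below) =====
def Claim_equal_set_word_to_unicode : Prop := ∀ (sp : String) (conversion : List (String × String)), Dom_set_word_to_unicode sp conversion → Pre_set_word_to_unicode sp conversion → Spec_set_word_to_unicode sp conversion (set_word_to_unicode sp conversion)

-- ===== LEMMAS AND PROOFS =====

-- A's loop, started at index i on a nonempty suffix cs whose last element lands on index n,
-- appends the lookups of all but the last element and then the adjusted last lookup.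
lemma loopA_eq (L : Char → List Char) (n : Int) :
    ∀ (cs : List Char) (i : Int) (acc : List Char) (h : cs ≠ []), i + cs.length = n + 1 →
    (cs.foldl (fun (st : Int × List Char) c =>
        let c := if st.1 == n then test_final_character c else c
        (st.1 + 1, st.2 ++ L c)) (i, acc)).2
      = acc ++ cs.dropLast.flatMap L ++ L (test_final_character (cs.getLast h)) := by
  intro cs
  induction cs with
  | nil => intro i acc h; exact absurd rfl h
  | cons c tl ih =>
    intro i acc _ hlen
    cases tl with
    | nil =>
      have hi : i = n := by simp at hlen; omega
      simp [List.foldl, hi]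
    | cons d rest =>
      have hne : (i == n) = false := by
        simp only [List.length_cons] at hlen
        simp only [beq_eq_false_iff_ne, ne_eq]
        intro he; omega
      have hlen' : (i + 1) + ((d :: rest).length : Int) = n + 1 := by
        simp only [List.length_cons] at hlen ⊢; push_cast at hlen ⊢; omega
      have := ih (i + 1) (acc ++ L c) (by simp) hlen'
      simp only [List.foldl, hne, Bool.false_eq_true, if_false] at this ⊢
      rw [this]
      simp [List.dropLast, List.getLast]

-- B's recursion computes the same split: all-but-last lookups, then the adjusted last lookup.
lemma goB_eq (conversion : List (String × String)) :
    ∀ (cs : List Char) (h : cs ≠ []),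
      set_word_to_unicode_go conversion cs
        = cs.dropLast.flatMap (pvLookup conversion)
            ++ pvLookup conversion (test_final_character (cs.getLast h)) := by
  intro cs
  induction cs with
  | nil => intro h; exact absurd rfl h
  | cons c tl ih =>
    intro _
    cases tl with
    | nil => simp [set_word_to_unicode_go]
    | cons d rest =>
      rw [set_word_to_unicode_go, ih (by simp)]
      simp [List.dropLast, List.getLast]

-- ===== VERDICT (by name: the statement is the Claim_ definition above) =====
theorem set_word_to_unicode_spec : Claim_equal_set_word_to_unicode := by
  intro sp conversion _ _
  unfold Spec_set_word_to_unicode set_word_to_unicode set_word_to_unicode_alt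
  cases h : sp.toList with
  | nil => simp [set_word_to_unicode_go]
  | cons c0 rest =>
    have hlen : (PySem.Str.len sp) = ((c0 :: rest).length : Int) := by
      rw [PySem.Str.len_eq, h]
    rw [hlen]
    have key := loopA_eq (pvLookup conversion) ((c0 :: rest).length : Int) (c0 :: rest) 1 []
      (by simp) (by omega)
    show String.mk ((List.foldl (fun (st : Int × List Char) c =>
        let c := if st.1 == ((c0 :: rest).length : Int) then test_final_character c else c
        (st.1 + 1, st.2 ++ pvLookup conversion c)) (1, []) (c0 :: rest)).2) = _
    rw [key, goB_eq conversion (c0 :: rest) (by simp)]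
    simp
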